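-- pv_equiv track=rewrite | github.com/vickey-kapoor/UI_Navigator | tests/agent_runner.py | _extract_failure_message
-- ===== SOURCE A (Python) =====
-- def _extract_failure_message(stderr: str, test_name: str) -> str:
--     """Extract the failure message from pytest stderr for a given test."""
--     lines = stderr.splitlines()
--     capture = False
--     captured: list[str] = []
--     for line in lines:
--         if test_name in line and ("FAILED" in line or "ERROR" in line):
--             capture = True
--         if capture:
--             captured.append(line)
--             if len(captured) > 20:
--                 break
--     return "\n".join(captured)[:500]
-- ===== SOURCE B (Python) =====
-- def _extract_failure_message(stderr: str, test_name: str) -> str: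
--     """Extract the failure message from pytest stderr for a given test."""
--     lines = stderr.splitlines()
--     idx = next((i for i, line in enumerate(lines)
--                 if test_name in line and ("FAILED" in line or "ERROR" in line)), None)
--     if idx is None:
--         return ""
--     return "\n".join(lines[idx:idx + 21])[:500]
-- ===== Notes on version B (the rewrite author's own statement) =====
-- stated objective: simpler
-- what changed: Replaces the flag-and-counter single pass (capture flag, growing list, break after 21) with a locate-then-slice decomposition: find the index of the first triggering line, slice a fixed 21-line window, join and truncate.
import Mathlib
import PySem

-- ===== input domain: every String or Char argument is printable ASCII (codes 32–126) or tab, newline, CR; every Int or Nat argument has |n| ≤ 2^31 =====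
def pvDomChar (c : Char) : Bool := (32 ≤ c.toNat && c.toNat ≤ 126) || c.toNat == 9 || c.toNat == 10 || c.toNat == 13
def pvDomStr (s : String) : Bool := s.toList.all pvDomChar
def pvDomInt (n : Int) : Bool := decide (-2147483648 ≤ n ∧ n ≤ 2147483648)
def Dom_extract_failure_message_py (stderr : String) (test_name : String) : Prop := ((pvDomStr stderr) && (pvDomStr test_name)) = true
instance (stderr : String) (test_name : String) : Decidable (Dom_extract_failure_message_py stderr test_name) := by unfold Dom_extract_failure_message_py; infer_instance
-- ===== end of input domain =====

-- B replaces A's flag-and-counter single pass by a locate-then-slice decomposition (objective: simpler).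

-- ===== PORT A =====
-- the trigger test 'test_name in line and ("FAILED" in line or "ERROR" in line)'
def pvTrig (test_name line : String) : Bool :=
  PySem.Str.isIn test_name line && (PySem.Str.isIn "FAILED" line || PySem.Str.isIn "ERROR" line)

-- A's for-loop over 'lines' with state (capture, captured); 'break' = stop recursing
def pvLoopA (test_name : String) : List String → Bool → List String → List String
  | [], _, acc => acc
  | l :: ls, capture, acc =>
    let capture := if pvTrig test_name l then true else capture
    if capture then
      let acc := acc ++ [l]
      if acc.length > 20 then acc else pvLoopA test_name ls capture acc
    else pvLoopA test_name ls capture acc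

def extract_failure_message_py (stderr : String) (test_name : String) : String :=
  let lines := PySem.Str.splitlines stderr
  let captured := pvLoopA test_name lines false []
  PySem.Str.slice (PySem.Str.join "\n" captured) none (some 500)

-- ===== PORT B =====
def extract_failure_message_py_alt (stderr : String) (test_name : String) : String :=
  let lines := PySem.Str.splitlines stderr
  match lines.findIdx? (fun line => pvTrig test_name line) with  -- next((i for i, line in enumerate(lines) if …), None)
  | none => ""
  | some i =>
    PySem.Str.slice (PySem.Str.join "\n" (PySem.List.slice lines (some (i : Int)) (some ((i : Int) + 21)))) none (some 500)

-- ===== PRECONDITION & SPEC =====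
def Spec_extract_failure_message_py (stderr : String) (test_name : String) (out : String) : Prop := out = extract_failure_message_py_alt stderr test_name
instance (stderr : String) (test_name : String) (out : String) : Decidable (Spec_extract_failure_message_py stderr test_name out) := by unfold Spec_extract_failure_message_py; infer_instance

-- ===== CLAIM (what is proved, stated in full; the proofs are below) =====
def Claim_equal_extract_failure_message_py : Prop := ∀ (stderr : String) (test_name : String), Dom_extract_failure_message_py stderr test_name → Spec_extract_failure_message_py stderr test_name (extract_failure_message_py stderr test_name)

-- ===== LEMMAS AND PROOFS =====

-- once 'capture' is set, A just collects the next lines until 21 are captured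
theorem pvLoopA_capture (t : String) (ls : List String) : ∀ acc : List String,
    acc.length ≤ 20 → pvLoopA t ls true acc = acc ++ ls.take (21 - acc.length) := by
  induction ls with
  | nil => intro acc _; simp [pvLoopA]
  | cons l ls ih =>
    intro acc hle
    by_cases h20 : acc.length = 20
    · simp [pvLoopA, h20]
    · have hlt : acc.length + 1 ≤ 20 := by omega
      have := ih (acc ++ [l]) (by simpa using hlt)
      simp only [pvLoopA, List.length_append, List.length_singleton] at *
      have hnot : ¬ acc.length + 1 > 20 := by omega
      simp only [gt_iff_lt, hnot, if_false, if_true, ite_self]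
      rw [this]
      have : 21 - (acc.length + 1) = 20 - acc.length := by omega
      rw [this]
      have h21 : 21 - acc.length = (20 - acc.length) + 1 := by omega
      simp [h21, List.take_succ_cons, List.append_assoc]

-- before the trigger fires, A scans; the result is the 21-line window at the first trigger
theorem pvLoopA_main (t : String) (ls : List String) :
    pvLoopA t ls false [] =
      (match ls.findIdx? (fun line => pvTrig t line) with
       | none => []
       | some i => (ls.drop i).take 21) := by
  induction ls with
  | nil => simp [pvLoopA]
  | cons l ls ih =>
    by_cases h : pvTrig t l
    · have h1 : ¬ ([] ++ [l] : List String).length > 20 := by simp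
      simp only [pvLoopA, h, if_true, List.nil_append]
      rw [pvLoopA_capture t ls [l] (by simp)]
      simp [List.findIdx?_cons, h, List.take_succ_cons]
    · rw [show pvLoopA t (l :: ls) false [] = pvLoopA t ls false [] from by simp [pvLoopA, h]]
      rw [ih, List.findIdx?_cons]
      cases hf : ls.findIdx? (fun line => pvTrig t line) <;> simp [h]

-- ===== VERDICT (by name: the statement is the Claim_ definition above) =====
theorem extract_failure_message_py_spec : Claim_equal_extract_failure_message_py := by
  intro stderr test_name _
  unfold Spec_extract_failure_message_py extract_failure_message_py extract_failure_message_py_alt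
  dsimp only
  rw [pvLoopA_main]
  cases hf : (PySem.Str.splitlines stderr).findIdx? (fun line => pvTrig test_name line) with
  | none =>
      simp [PySem.Str.join, PySem.Chars.join, PySem.Str.slice, PySem.Chars.slice,
        PySem.List.slice, List.intercalate]
  | some i =>
    dsimp only
    have h21 : ((i : Int) + 21) = ((i + 21 : Nat) : Int) := by push_cast; ring
    rw [h21, PySem.List.slice_natCast]
    simp
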